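-- pv_equiv track=rewrite | github.com/amunde/sentiment-polarity-analyser | feature.py | feature_vector_method_2
-- ===== SOURCE A (Python) =====
-- def feature_vector_method_2(data, dictionary):
--     # if method = 2
--     untrimmed_feature_vectors = []
--
--     for line in data:
--
--         y = line.split('\t')[0]
--
--         words = line.split('\t')[1].split(' ')
--
--         feature_vector = dict()
--
--         for word in words:
--
--             if word in dictionary:
--
--                 if dictionary[word] in feature_vector:
--
--                     feature_vector[dictionary[word]] = feature_vector[dictionary[word]] + 1
--                 else:
--
--                     feature_vector[dictionary[word]] = 1
--
--         untrimmed_feature_vectors.append(feature_vector)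
--
--     trimmed_feature_vectors = []
--
--     threshold = 4
--
--     for dictionary in untrimmed_feature_vectors:
--
--         trimmed_dictionary = dict()
--
--         for key, value in dictionary.items():
--
--             if value < threshold:
--                 trimmed_dictionary[key] = 1
--
--         trimmed_feature_vectors.append(trimmed_dictionary)
--
--     return trimmed_feature_vectors
-- ===== SOURCE B (Python) =====
-- def feature_vector_method_2(data, dictionary):
--     # One pass per line, no untrimmed list and no trimming pass: a feature is
--     # inserted the first time its word matches and evicted the moment its
--     # count reaches the threshold 4, so the kept dict is always the answer.
--     result = []
--     for line in data:
--         words = line.split('\t')[1].split(' ')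
--         counts = {}
--         kept = {}
--         for w in words:
--             if w in dictionary:
--                 f = dictionary[w]
--                 c = counts.get(f, 0) + 1
--                 counts[f] = c
--                 if c == 1:
--                     kept[f] = 1
--                 elif c == 4:
--                     del kept[f]
--         result.append(kept)
--     return result
-- ===== Notes on version B (the rewrite author's own statement) =====
-- stated objective: alternative
-- what changed: B replaces A's two staged passes (build per-line count dicts into an intermediate list, then a separate trimming pass) by one online pass: per line it keeps the answer dict up to date directly, inserting a feature at its first occurrence and evicting it the moment its count reaches 4, so there is no untrimmed_feature_vectors list and no trim loop.
import Mathlib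
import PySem

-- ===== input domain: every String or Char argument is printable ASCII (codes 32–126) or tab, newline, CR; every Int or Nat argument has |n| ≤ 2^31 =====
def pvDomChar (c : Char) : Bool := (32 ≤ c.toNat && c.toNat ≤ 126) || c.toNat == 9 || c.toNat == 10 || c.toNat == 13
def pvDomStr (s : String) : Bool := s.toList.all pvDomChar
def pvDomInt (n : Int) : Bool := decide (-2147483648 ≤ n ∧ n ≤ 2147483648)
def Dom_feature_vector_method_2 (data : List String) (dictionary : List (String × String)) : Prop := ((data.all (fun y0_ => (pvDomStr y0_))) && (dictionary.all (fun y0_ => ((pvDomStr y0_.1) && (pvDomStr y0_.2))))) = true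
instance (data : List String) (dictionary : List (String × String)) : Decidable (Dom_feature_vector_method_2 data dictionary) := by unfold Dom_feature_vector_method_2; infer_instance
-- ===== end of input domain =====

-- B replaces A's two staged passes (count dicts collected in an intermediate list, then a trimming
-- pass) by a single online pass that keeps the answer dict up to date directly: a feature is
-- inserted at its first occurrence and evicted the moment its count reaches 4 (objective: alternative).

-- ===== PORT A =====
def feature_vector_method_2 (data : List String) (dictionary : List (String × String)) : List (List (String × Int)) :=
  let dct := PySem.Dict.mk dictionary
  -- first loop: build the untrimmed per-line feature-count dicts
  let untrimmed : List (PySem.Dict String Int) := data.foldl (fun acc line =>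
    let _y := (PySem.List.pyGet? (((PySem.Str.split? line "\t").getD [])) 0).getD ""   -- y = line.split('\t')[0] (unused)
    -- line.split('\t')[1] raises IndexError when no tab: excluded by Pre_; .getD "" is dead there
    let words := ((PySem.Str.split? ((PySem.List.pyGet? (((PySem.Str.split? line "\t").getD [])) 1).getD "") " ").getD [])
    let fv := words.foldl (fun fv word =>
      if dct.contains word then
        let v := (dct.get? word).getD ""        -- dictionary[word]; contains guarantees some
        if fv.contains v then fv.insert v (fv.getD v 0 + 1) else fv.insert v 1
      else fv) PySem.Dict.empty
    acc ++ [fv]) []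
  -- second loop: trim each dict with threshold 4
  untrimmed.foldl (fun acc d =>
    acc ++ [(d.items.foldl (fun td kv => if kv.2 < 4 then td.insert kv.1 1 else td) PySem.Dict.empty).items]) []

-- ===== PORT B =====
def feature_vector_method_2_alt (data : List String) (dictionary : List (String × String)) : List (List (String × Int)) :=
  let dct := PySem.Dict.mk dictionary
  data.foldl (fun res line =>
    -- line.split('\t')[1] raises IndexError when no tab: excluded by Pre_; .getD "" is dead there
    let words := ((PySem.Str.split? ((PySem.List.pyGet? (((PySem.Str.split? line "\t").getD [])) 1).getD "") " ").getD [])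
    let st := words.foldl (fun (st : PySem.Dict String Int × PySem.Dict String Int) w =>
      if dct.contains w then
        let f := (dct.get? w).getD ""           -- dictionary[w]; contains guarantees some
        let c := st.1.getD f 0 + 1              -- c = counts.get(f, 0) + 1
        let counts := st.1.insert f c           -- counts[f] = c
        if c == 1 then (counts, st.2.insert f 1)        -- first occurrence: keep
        else if c == 4 then (counts, st.2.erase f)      -- reached threshold: evict
        else (counts, st.2)
      else st) (PySem.Dict.empty, PySem.Dict.empty)
    res ++ [st.2.items]) []

-- ===== PRECONDITION & SPEC =====
-- Pre_ excludes exactly the inputs where Python A raises IndexError: a line without a tab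
-- (line.split('\t') has fewer than 2 pieces).  B raises there too.
def Pre_feature_vector_method_2 (data : List String) (_dictionary : List (String × String)) : Prop :=
  ∀ line ∈ data, 2 ≤ (((PySem.Str.split? line "\t").getD [])).length
instance (data : List String) (dictionary : List (String × String)) : Decidable (Pre_feature_vector_method_2 data dictionary) := by unfold Pre_feature_vector_method_2; infer_instance

def pvWitness_feature_vector_method_2 : List String × (List (String × String)) :=
  (["pos\tgood bad good", "neg\tbad"], [("good", "f1"), ("bad", "f2")])

def Spec_feature_vector_method_2 (data : List String) (dictionary : List (String × String)) (out : List (List (String × Int))) : Prop := out = feature_vector_method_2_alt data dictionary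
instance (data : List String) (dictionary : List (String × String)) (out : List (List (String × Int))) : Decidable (Spec_feature_vector_method_2 data dictionary out) := by unfold Spec_feature_vector_method_2; infer_instance

-- ===== CLAIM (what is proved, stated in full; the proofs are below) =====
def Claim_equal_feature_vector_method_2 : Prop := ∀ (data : List String) (dictionary : List (String × String)), Dom_feature_vector_method_2 data dictionary → Pre_feature_vector_method_2 data dictionary → Spec_feature_vector_method_2 data dictionary (feature_vector_method_2 data dictionary)

-- ===== LEMMAS AND PROOFS =====

-- the canonical per-line answer: the distinct matched features with count < 4, each paired with 1
def pvL (fs : List String) : List (String × Int) :=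
  ((PySem.Set.ofList fs).filter (fun g => decide (fs.count g < 4))).map (fun g => (g, (1 : Int)))

-- fold over a filterMap is the fold that skips the `none`s (the `if word in dictionary` loops)
theorem pvFoldlFilterMap {α β γ : Type} (l : List α) (f : α → Option β) (g : γ → β → γ) (init : γ) :
    (l.filterMap f).foldl g init = l.foldl (fun acc x => match f x with | some v => g acc v | none => acc) init := by
  induction l generalizing init with
  | nil => rfl
  | cons x l ih =>
    simp only [List.filterMap_cons]
    cases h : f x <;> simp [List.foldl_cons, h, ih]

-- A's per-line count-then-trim dict has items pvL fs
theorem pvTrimA (dct : PySem.Dict String String) (words : List String) :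
    ((words.foldl (fun fv word =>
        if dct.contains word then
          let v := (dct.get? word).getD ""
          if fv.contains v then fv.insert v (fv.getD v 0 + 1) else fv.insert v 1
        else fv) (PySem.Dict.empty : PySem.Dict String Int)).items.foldl
          (fun td kv => if kv.2 < 4 then td.insert kv.1 1 else td) (PySem.Dict.empty : PySem.Dict String Int)).items
    = pvL (words.filterMap (fun w => dct.get? w)) := by
  set fs := words.filterMap (fun w => dct.get? w) with hfs
  -- A's inner loop is the counter of fs
  have hA : words.foldl (fun fv word =>
        if dct.contains word then
          let v := (dct.get? word).getD ""
          if fv.contains v then fv.insert v (fv.getD v 0 + 1) else fv.insert v 1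
        else fv) PySem.Dict.empty = PySem.Dict.counter fs := by
    rw [← PySem.Dict.foldl_insert_getD_add_one_eq_counter, hfs, pvFoldlFilterMap]
    apply PySem.List.foldl_congr_mem
    intro fv word _
    cases h : dct.get? word with
    | none =>
      have : dct.contains word = false := by
        rw [PySem.Dict.contains_eq_isSome_get?, h]; rfl
      simp [this]
    | some v =>
      have hcw : dct.contains word = true := by
        rw [PySem.Dict.contains_eq_isSome_get?, h]; rfl
      simp only [hcw, if_true, Option.getD_some]
      by_cases hc : fv.contains v = true
      · simp [hc]
      · have h0 : fv.getD v 0 = 0 :=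
          PySem.Dict.getD_of_not_contains _ _ (by simpa using hc)
        simp [hc, h0]
  rw [hA]
  -- trim A's counter: keep each distinct feature with count < 4, value 1
  simp only [PySem.List.foldl_ite_eq_foldl_filter]
  rw [PySem.Dict.items_counter, List.filter_map]
  have h1 : ((List.map (fun k => (k, (List.count k fs : Int)))
        (List.filter ((fun x : String × Int => decide (x.2 < 4)) ∘ fun k => (k, (List.count k fs : Int)))
          (PySem.Set.ofList fs))).foldl
        (fun acc x => acc.insert x.1 (1 : Int)) PySem.Dict.empty).items
      = (List.filter ((fun x : String × Int => decide (x.2 < 4)) ∘ fun k => (k, (List.count k fs : Int)))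
          (PySem.Set.ofList fs)).map (fun k => (k, (1 : Int))) := by
    refine (PySem.Dict.items_foldl_insert_fresh _ (fun x : String × Int => x.1) (fun _ => (1 : Int)) _
        (fun a _ => PySem.Dict.contains_empty ..) ?_).trans ?_
    · have hnd := (PySem.Set.nodup_ofList fs).filter
        ((fun x : String × Int => decide (x.2 < 4)) ∘ fun k => (k, (List.count k fs : Int)))
      simpa [Function.comp_def] using hnd
    · simp [List.map_map, Function.comp, PySem.Dict.empty]
  rw [h1]
  -- identical predicates up to the Nat → Int cast
  have hp : ((fun x : String × Int => decide (x.2 < 4)) ∘ fun k => (k, (List.count k fs : Int)))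
      = fun k => decide (List.count k fs < 4) := by
    funext k
    simp only [Function.comp]
    rw [decide_eq_decide]
    exact_mod_cast Iff.rfl
  rw [hp, pvL]

-- B's step over the stream of matched features
def pvStep (st : PySem.Dict String Int × PySem.Dict String Int) (f : String) :
    PySem.Dict String Int × PySem.Dict String Int :=
  let c := st.1.getD f 0 + 1
  let counts := st.1.insert f c
  if c == 1 then (counts, st.2.insert f 1)
  else if c == 4 then (counts, st.2.erase f)
  else (counts, st.2)

-- pvL over one more feature: a fresh feature appends
theorem pvL_append_not_mem (p : List String) (f : String) (h : f ∉ p) :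
    pvL (p ++ [f]) = pvL p ++ [(f, 1)] := by
  unfold pvL
  have hset : PySem.Set.ofList (p ++ [f]) = PySem.Set.ofList p ++ [f] := by
    have h1 : PySem.Set.ofList (p ++ [f]) = PySem.Set.add (PySem.Set.ofList p) f := by
      rw [PySem.Set.ofList_eq_foldl, PySem.Set.ofList_eq_foldl, List.foldl_append]; rfl
    have h2 : PySem.Set.contains (PySem.Set.ofList p) f = false := by
      rw [Bool.eq_false_iff]
      intro hc
      exact h ((PySem.Set.mem_ofList _ _).mp ((PySem.Set.contains_iff _ _).mp hc))
    rw [h1, PySem.Set.add, h2]; simp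
  rw [hset, List.filter_append]
  have hcf : ∀ g ∈ PySem.Set.ofList p,
      decide (List.count g (p ++ [f]) < 4) = decide (List.count g p < 4) := by
    intro g hg
    have hgf : g ≠ f := fun e => h (e ▸ (PySem.Set.mem_ofList _ _).mp hg)
    have h0 : List.count g [f] = 0 := List.count_eq_zero.mpr (by simp [hgf])
    rw [List.count_append, h0, Nat.add_zero]
  rw [List.filter_congr hcf]
  have hp0 : List.count f p = 0 := List.count_eq_zero.mpr h
  simp [List.count_append, hp0]

-- pvL over one more feature: a repeated feature below/above the boundary changes nothing
theorem pvL_append_mem (p : List String) (f : String) (hf : f ∈ p) (h : List.count f p ≠ 3) :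
    pvL (p ++ [f]) = pvL p := by
  unfold pvL
  have hset : PySem.Set.ofList (p ++ [f]) = PySem.Set.ofList p := by
    have h1 : PySem.Set.ofList (p ++ [f]) = PySem.Set.add (PySem.Set.ofList p) f := by
      rw [PySem.Set.ofList_eq_foldl, PySem.Set.ofList_eq_foldl, List.foldl_append]; rfl
    have h2 : PySem.Set.contains (PySem.Set.ofList p) f = true :=
      (PySem.Set.contains_iff _ _).mpr ((PySem.Set.mem_ofList _ _).mpr hf)
    rw [h1, PySem.Set.add, h2]; simp
  rw [hset]
  refine congrArg _ (List.filter_congr fun g _ => ?_)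
  rw [List.count_append]
  by_cases hgf : g = f
  · subst hgf
    have h1 : List.count g [g] = 1 := by simp
    rw [h1, decide_eq_decide]
    omega
  · have h0 : List.count g [f] = 0 := List.count_eq_zero.mpr (by simp [hgf])
    rw [h0, Nat.add_zero]

-- pvL over one more feature: the fourth occurrence evicts it
theorem pvL_append_third (p : List String) (f : String) (h : List.count f p = 3) :
    pvL (p ++ [f]) = (pvL p).filter (fun kv => !(kv.1 == f)) := by
  have hf : f ∈ p := List.count_pos_iff.mp (by omega)
  unfold pvL
  have hset : PySem.Set.ofList (p ++ [f]) = PySem.Set.ofList p := by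
    have h1 : PySem.Set.ofList (p ++ [f]) = PySem.Set.add (PySem.Set.ofList p) f := by
      rw [PySem.Set.ofList_eq_foldl, PySem.Set.ofList_eq_foldl, List.foldl_append]; rfl
    have h2 : PySem.Set.contains (PySem.Set.ofList p) f = true :=
      (PySem.Set.contains_iff _ _).mpr ((PySem.Set.mem_ofList _ _).mpr hf)
    rw [h1, PySem.Set.add, h2]; simp
  rw [hset, List.filter_map]
  refine congrArg _ ?_
  rw [List.filter_filter]
  refine List.filter_congr fun g _ => ?_
  rw [List.count_append]
  by_cases hgf : g = f
  · subst hgf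
    have h1 : List.count g [g] = 1 := by simp
    rw [h1, h]
    simp
  · have h0 : List.count g [f] = 0 := List.count_eq_zero.mpr (by simp [hgf])
    rw [h0, Nat.add_zero]
    simp [hgf]

-- the kept dict never holds a feature outside p
theorem pvL_contains_false (p : List String) (f : String) (h : f ∉ p) :
    (PySem.Dict.mk (pvL p) : PySem.Dict String Int).contains f = false := by
  rw [Bool.eq_false_iff]
  intro hc
  have hc' : (pvL p).any (fun kv => kv.1 == f) = true := hc
  rcases List.any_eq_true.mp hc' with ⟨kv, hkv, hb⟩
  simp only [pvL] at hkv
  rcases List.mem_map.mp hkv with ⟨g, hg, rfl⟩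
  have hgp : g ∈ p := (PySem.Set.mem_ofList _ _).mp (List.mem_filter.mp hg).1
  have hgf : g = f := by simpa using hb
  exact h (hgf ▸ hgp)

-- the invariant of B's single pass: counts is the counter, kept is the answer
theorem pvInvB (fs : List String) :
    fs.foldl pvStep (PySem.Dict.empty, PySem.Dict.empty)
      = (PySem.Dict.counter fs, PySem.Dict.mk (pvL fs)) := by
  induction fs using List.reverseRecOn with
  | nil => rfl
  | append_singleton p f ih =>
    rw [List.foldl_append, ih, List.foldl_cons, List.foldl_nil]
    have hcount : (PySem.Dict.counter p).getD f 0 = (List.count f p : Int) :=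
      PySem.Dict.getD_counter ..
    have hcounts : (PySem.Dict.counter p).insert f ((List.count f p : Int) + 1)
        = PySem.Dict.counter (p ++ [f]) := by
      calc (PySem.Dict.counter p).insert f ((List.count f p : Int) + 1)
          = (PySem.Dict.counter p).insert f ((PySem.Dict.counter p).getD f 0 + 1) := by
            rw [hcount]
        _ = List.foldl (fun d x => d.insert x (d.getD x 0 + 1))
              (List.foldl (fun d x => d.insert x (d.getD x 0 + 1)) PySem.Dict.empty p) [f] := by
            rw [PySem.Dict.foldl_insert_getD_add_one_eq_counter]; rfl
        _ = List.foldl (fun d x => d.insert x (d.getD x 0 + 1)) PySem.Dict.empty (p ++ [f]) :=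
            (List.foldl_append ..).symm
        _ = PySem.Dict.counter (p ++ [f]) :=
            PySem.Dict.foldl_insert_getD_add_one_eq_counter _
    simp only [pvStep, hcount, hcounts]
    by_cases h1 : List.count f p = 0
    · have hnm : f ∉ p := List.count_eq_zero.mp h1
      have hc : (((List.count f p : Int) + 1) == 1) = true := by simp [h1]
      rw [hc, if_pos rfl]
      refine Prod.ext rfl (PySem.Dict.ext ?_)
      rw [PySem.Dict.insert, pvL_contains_false p f hnm]
      simp [pvL_append_not_mem p f hnm]
    · have hm : f ∈ p := List.count_pos_iff.mp (by omega)
      have hc1 : (((List.count f p : Int) + 1) == 1) = false := by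
        rw [beq_eq_false_iff_ne]
        intro e
        have : (List.count f p : Int) = 0 := by omega
        exact h1 (by exact_mod_cast this)
      rw [hc1]
      by_cases h3 : List.count f p = 3
      · have hc4 : (((List.count f p : Int) + 1) == 4) = true := by simp [h3]
        rw [if_neg (by simp), hc4, if_pos rfl]
        refine Prod.ext rfl (PySem.Dict.ext ?_)
        rw [pvL_append_third p f h3]
        rfl
      · have hc4 : (((List.count f p : Int) + 1) == 4) = false := by
          rw [beq_eq_false_iff_ne]
          intro e
          have : (List.count f p : Int) = 3 := by omega
          exact h3 (by exact_mod_cast this)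
        rw [if_neg (by simp), hc4, if_neg (by simp)]
        exact Prod.ext rfl (congrArg PySem.Dict.mk (pvL_append_mem p f hm h3).symm)

-- B's per-line online kept dict has items pvL fs
theorem pvKeptB (dct : PySem.Dict String String) (words : List String) :
    (words.foldl (fun (st : PySem.Dict String Int × PySem.Dict String Int) w =>
      if dct.contains w then
        let f := (dct.get? w).getD ""
        let c := st.1.getD f 0 + 1
        let counts := st.1.insert f c
        if c == 1 then (counts, st.2.insert f 1)
        else if c == 4 then (counts, st.2.erase f)
        else (counts, st.2)
      else st) (PySem.Dict.empty, PySem.Dict.empty)).2.items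
    = pvL (words.filterMap (fun w => dct.get? w)) := by
  have h : words.foldl (fun (st : PySem.Dict String Int × PySem.Dict String Int) w =>
      if dct.contains w then
        let f := (dct.get? w).getD ""
        let c := st.1.getD f 0 + 1
        let counts := st.1.insert f c
        if c == 1 then (counts, st.2.insert f 1)
        else if c == 4 then (counts, st.2.erase f)
        else (counts, st.2)
      else st) (PySem.Dict.empty, PySem.Dict.empty)
      = (words.filterMap (fun w => dct.get? w)).foldl pvStep
          (PySem.Dict.empty, PySem.Dict.empty) := by
    rw [pvFoldlFilterMap]
    apply PySem.List.foldl_congr_mem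
    intro st w _
    cases h : dct.get? w with
    | none =>
      have : dct.contains w = false := by
        rw [PySem.Dict.contains_eq_isSome_get?, h]; rfl
      simp [this]
    | some v =>
      have hcw : dct.contains w = true := by
        rw [PySem.Dict.contains_eq_isSome_get?, h]; rfl
      simp [hcw, pvStep]
  rw [h, pvInvB]

-- ===== VERDICT (by name: the statement is the Claim_ definition above) =====
theorem feature_vector_method_2_spec : Claim_equal_feature_vector_method_2 := by
  intro data dictionary _ _
  unfold Spec_feature_vector_method_2 feature_vector_method_2 feature_vector_method_2_alt
  simp only [PySem.List.foldl_append_singleton_eq_map, List.nil_append, List.map_map]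
  refine List.map_congr_left (fun line _ => ?_)
  exact (pvTrimA (PySem.Dict.mk dictionary) _).trans (pvKeptB (PySem.Dict.mk dictionary) _).symm
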